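-- pv_equiv track=rewrite | github.com/Brickea/news-collector | src/collector.py | _generate_shingles
-- ===== SOURCE A (Python) =====
-- def _generate_shingles(text: str, k: int = 3) -> set:
--     """Generate k-shingles (k-grams) from text for better similarity detection.
--
--     Shingles capture word order and context better than simple word sets.
--     For example, "machine learning" vs "learning machine" will have different shingles.
--
--     Args:
--         text: Input text
--         k: Number of consecutive words in each shingle (default 3)
--
--     Returns:
--         Set of k-shingles
--     """
--     words = text.lower().split()
--     if len(words) < k:
--         # If text is too short, use the whole text as a single shingle
--         return {' '.join(words)} if words else set()
--
--     # Generate sliding window of k consecutive words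
--     shingles = set()
--     for i in range(len(words) - k + 1):
--         shingle = ' '.join(words[i:i + k])
--         shingles.add(shingle)
--     return shingles
-- ===== SOURCE B (Python) =====
-- def _generate_shingles(text: str, k: int = 3) -> set:
--     """Generate k-shingles by a single streaming pass with a rolling k-word window."""
--     words = text.lower().split()
--     if len(words) < k:
--         return {' '.join(words)} if words else set()
--     shingles = set()
--     window = []
--     for w in words:
--         window.append(w)
--         if len(window) > k:
--             window.pop(0)
--         if len(window) == k:
--             shingles.add(' '.join(window))
--     return shingles
-- ===== Notes on version B (the rewrite author's own statement) =====
-- stated objective: alternative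
-- what changed: A's index loop over range(len(words)-k+1) with a fresh slice-and-join per window is replaced by a single streaming pass over the words that maintains a rolling k-word window (append each word, pop the oldest, emit when the window is full) as explicit loop state.
-- outside the precondition, e.g. on _generate_shingles('', 0): A returns {''}, B returns set()
import Mathlib
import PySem

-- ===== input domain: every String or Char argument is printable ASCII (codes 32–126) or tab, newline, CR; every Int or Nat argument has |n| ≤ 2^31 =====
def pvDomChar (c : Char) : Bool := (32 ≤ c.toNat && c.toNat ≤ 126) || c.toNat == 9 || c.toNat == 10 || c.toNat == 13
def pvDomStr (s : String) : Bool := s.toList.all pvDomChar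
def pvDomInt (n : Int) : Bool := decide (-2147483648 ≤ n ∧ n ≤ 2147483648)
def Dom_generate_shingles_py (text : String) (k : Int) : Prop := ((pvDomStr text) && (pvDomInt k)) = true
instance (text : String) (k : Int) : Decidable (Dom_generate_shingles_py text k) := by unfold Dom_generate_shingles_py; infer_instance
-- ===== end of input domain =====

-- B replaces A's index loop with per-window slicing by a single streaming pass
-- maintaining a rolling k-word window as explicit loop state (alternative; same cost).

-- ===== PORT A =====
def generate_shingles_py (text : String) (k : Int) : List String :=
  let words := PySem.Str.split₀ (PySem.Str.lower text)
  if ((words.length : Int) < k) then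
    if words ≠ [] then [PySem.Str.join " " words] else PySem.Set.empty
  else
    (PySem.List.pyRange 0 ((words.length : Int) - k + 1) 1).foldl
      (fun shingles i =>
        PySem.Set.add shingles
          (PySem.Str.join " " (PySem.List.slice words (some i) (some (i + k)))))
      PySem.Set.empty

-- ===== PORT B =====
-- the loop body of B: append the word, pop the oldest if the window overflows,
-- emit the joined window into the set when it is full
def pvStep (k : Int) (st : List String × List String) (w : String) :
    List String × List String :=
  let window := st.1 ++ [w]
  let window := if k < (window.length : Int) then window.tail else window
  (window,
    if ((window.length : Int) = k) then
      PySem.Set.add st.2 (PySem.Str.join " " window)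
    else st.2)

def generate_shingles_py_alt (text : String) (k : Int) : List String :=
  let words := PySem.Str.split₀ (PySem.Str.lower text)
  if ((words.length : Int) < k) then
    if words ≠ [] then [PySem.Str.join " " words] else PySem.Set.empty
  else
    (words.foldl (pvStep k) (([] : List String), (PySem.Set.empty : List String))).2

-- ===== PRECONDITION & SPEC =====
-- Pre_ excludes non-positive shingle sizes k ≤ 0, outside the natural domain of a
-- count of consecutive words; A's slice arithmetic there yields accidental values.
def Pre_generate_shingles_py (text : String) (k : Int) : Prop := 1 ≤ k
instance (text : String) (k : Int) : Decidable (Pre_generate_shingles_py text k) := by unfold Pre_generate_shingles_py; infer_instance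
def pvWitness_generate_shingles_py : String × Int := ("machine learning is Fun", 2)

def Spec_generate_shingles_py (text : String) (k : Int) (out : List String) : Prop := out = generate_shingles_py_alt text k
instance (text : String) (k : Int) (out : List String) : Decidable (Spec_generate_shingles_py text k out) := by unfold Spec_generate_shingles_py; infer_instance

-- ===== CLAIM (what is proved, stated in full; the proofs are below) =====
def Claim_equal_generate_shingles_py : Prop := ∀ (text : String) (k : Int), Dom_generate_shingles_py text k → Pre_generate_shingles_py text k → Spec_generate_shingles_py text k (generate_shingles_py text k)

-- ===== LEMMAS AND PROOFS =====

-- the sequence of shingle strings B's loop emits, starting from window `win`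
def pvEmit (k : Int) (win : List String) (ws : List String) : List String :=
  match ws with
  | [] => []
  | w :: rest =>
    let w1 := win ++ [w]
    let w2 := if k < (w1.length : Int) then w1.tail else w1
    (if ((w2.length : Int) = k) then [PySem.Str.join " " w2] else []) ++ pvEmit k w2 rest

-- B's fold is the fold of Set.add over the emitted strings
theorem pv_fold_emit (k : Int) : ∀ (ws win acc : List String),
    (ws.foldl (pvStep k) (win, acc)).2 = (pvEmit k win ws).foldl PySem.Set.add acc := by
  intro ws
  induction ws with
  | nil => intro win acc; simp [pvEmit]
  | cons w rest ih =>
      intro win acc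
      rw [List.foldl_cons, pvEmit]
      simp only [pvStep]
      rw [List.foldl_append, ih]
      congr 1
      split_ifs <;> simp

-- once the window is full, each step emits the next k-window of win ++ ws
theorem pv_emit_sat (k : Int) (hk : 1 ≤ k) : ∀ (ws win : List String),
    ((win.length : Int) = k) →
    pvEmit k win ws = (List.range ws.length).map
      (fun i => PySem.Str.join " " (((win ++ ws).drop (i + 1)).take k.toNat)) := by
  intro ws
  induction ws with
  | nil => intro win _; simp [pvEmit]
  | cons w rest ih =>
      intro win hwin
      obtain ⟨v, vs, rfl⟩ : ∃ v vs, win = v :: vs := by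
        cases win with
        | nil => simp at hwin; omega
        | cons v vs => exact ⟨v, vs, rfl⟩
      have hvs : (vs.length : Int) = k - 1 := by
        simp only [List.length_cons] at hwin; push_cast at hwin ⊢; omega
      rw [pvEmit]
      have h1 : k < (((v :: vs) ++ [w]).length : Int) := by
        simp only [List.length_append, List.length_cons, List.length_nil]
        push_cast; omega
      simp only [if_pos h1]
      have htail : ((v :: vs) ++ [w]).tail = vs ++ [w] := by simp
      rw [htail]
      have h2 : (((vs ++ [w]).length : Int) = k) := by
        simp only [List.length_append, List.length_cons, List.length_nil]
        push_cast; omega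
      rw [if_pos h2, ih (vs ++ [w]) h2]
      have hkt : k.toNat = vs.length + 1 := by omega
      simp only [List.length_cons]
      rw [List.range_succ_eq_map]
      simp only [List.map_cons, List.map_map]
      -- head emission: the first full window is the first k words
      simp only [List.cons_append, List.drop_succ_cons, List.drop_zero, hkt]
      rw [List.append_assoc, List.take_append, List.take_of_length_le (Nat.le_succ vs.length)]
      simp [Function.comp, Nat.succ_eq_add_one]

-- the filling phase: nothing is emitted until the window first reaches size k,
-- which emits the first k words and leaves them as the window
theorem pv_emit_fill (k : Int) : ∀ (ws win : List String),
    ((win.length : Int) < k) → (k ≤ (win.length : Int) + (ws.length : Int)) →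
    pvEmit k win ws =
      PySem.Str.join " " (win ++ ws.take (k.toNat - win.length)) ::
        pvEmit k (win ++ ws.take (k.toNat - win.length)) (ws.drop (k.toNat - win.length)) := by
  intro ws
  induction ws with
  | nil => intro win h1 h2; simp at h2; omega
  | cons w rest ih =>
      intro win h1 h2
      rw [pvEmit]
      have hno : ¬ k < (((win ++ [w]).length : Int)) := by
        simp only [List.length_append, List.length_nil, List.length_cons]
        push_cast; omega
      simp only [if_neg hno]
      by_cases hfull : (((win ++ [w]).length : Int) = k)
      · rw [if_pos hfull]
        have hone : k.toNat - win.length = 1 := by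
          simp only [List.length_append, List.length_cons, List.length_nil] at hfull
          push_cast at hfull; omega
        simp [hone]
      · rw [if_neg hfull]
        have hlt : (((win ++ [w]).length : Int) < k) := by
          simp only [List.length_append, List.length_cons, List.length_nil] at hno hfull ⊢
          push_cast at hno hfull ⊢; omega
        have hle : k ≤ (((win ++ [w]).length : Int)) + (rest.length : Int) := by
          simp only [List.length_cons] at h2
          simp only [List.length_append, List.length_cons, List.length_nil]
          push_cast at h2 ⊢; omega
        rw [ih (win ++ [w]) hlt hle]
        have hsub : k.toNat - win.length = (k.toNat - (win ++ [w]).length) + 1 := by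
          simp only [List.length_append, List.length_cons, List.length_nil]
          simp only [List.length_append, List.length_cons, List.length_nil] at hlt
          push_cast at hlt; omega
        rw [hsub]
        simp [List.append_assoc]

-- the full emitted sequence is exactly the list of k-windows of words
theorem pv_emit_windows (words : List String) (k : Int) (hk : 1 ≤ k)
    (hlen : k ≤ (words.length : Int)) :
    pvEmit k [] words = (List.range (words.length - k.toNat + 1)).map
      (fun i => PySem.Str.join " " ((words.drop i).take k.toNat)) := by
  have h1 : (([] : List String).length : Int) < k := by simp; omega
  have h2 : k ≤ (([] : List String).length : Int) + (words.length : Int) := by simpa using hlen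
  rw [pv_emit_fill k words [] h1 h2]
  simp only [List.nil_append, List.length_nil, Nat.sub_zero]
  have hfull : ((words.take k.toNat).length : Int) = k := by
    rw [List.length_take]
    have : k.toNat ≤ words.length := by omega
    rw [min_eq_left this]; omega
  rw [pv_emit_sat k hk (words.drop k.toNat) (words.take k.toNat) hfull,
    List.take_append_drop]
  have hcnt : words.length - k.toNat + 1 = (words.drop k.toNat).length + 1 := by
    simp [List.length_drop]
  rw [hcnt, List.range_succ_eq_map]
  simp only [List.map_cons, List.map_map, List.drop_zero]
  simp [Function.comp, Nat.succ_eq_add_one]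

-- A's list of shingle strings is the same list of k-windows
theorem pv_a_windows (words : List String) (k : Int) (hk : 1 ≤ k)
    (hlen : k ≤ (words.length : Int)) :
    (PySem.List.pyRange 0 ((words.length : Int) - k + 1) 1).map
        (fun i => PySem.Str.join " " (PySem.List.slice words (some i) (some (i + k)))) =
      (List.range (words.length - k.toNat + 1)).map
        (fun i => PySem.Str.join " " ((words.drop i).take k.toNat)) := by
  rw [PySem.List.pyRange_one, List.map_map, sub_zero]
  have hcnt : ((words.length : Int) - k + 1).toNat = words.length - k.toNat + 1 := by omega
  rw [hcnt]
  refine List.map_congr_left ?_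
  intro j _
  simp only [Function.comp, zero_add]
  have h0 : (0:Int) ≤ (j : Int) := by positivity
  have h1 : (0:Int) ≤ (j : Int) + k := by omega
  rw [PySem.List.slice_toNat words h0 h1]
  simp only [Int.toNat_natCast]
  congr 2
  omega

-- ===== VERDICT (by name: the statement is the Claim_ definition above) =====
theorem generate_shingles_py_spec : Claim_equal_generate_shingles_py := by
  intro text k _ hk
  unfold Spec_generate_shingles_py generate_shingles_py generate_shingles_py_alt
  set words := PySem.Str.split₀ (PySem.Str.lower text) with hw
  by_cases hshort : ((words.length : Int) < k)
  · simp [hshort]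
  · rw [if_neg hshort, if_neg hshort, pv_fold_emit,
      pv_emit_windows words k hk (by omega), ← pv_a_windows words k hk (by omega),
      List.foldl_map]
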